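-- pv_equiv track=rewrite | github.com/jmkjunior/python2024 | chef-oui-chef.py | check_salute
-- ===== SOURCE A (Python) =====
-- def check_salute(corridor):
--     # Vérifie si la chaîne de caractères est valide (contient uniquement les caractères autorisés)
--     if not all(char in '-<->' for char in corridor):
--         return 0  # Renvoie 0 si la chaîne de caractères est invalide
--
--     salute_count = 0  # Initialisation du compteur de salutations
--     left_to_right = 0  # Initialisation du nombre d'officiers se dirigeant de gauche à droite
--
--     # Parcourt chaque caractère dans le couloir
--     for char in corridor:
--         if char == '-':
--             left_to_right += 1  # Incrémente le nombre d'officiers se dirigeant de gauche à droite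
--         elif char == '>':
--             salute_count += left_to_right  # Chaque officier à gauche salue un officier à droite
--
--     return salute_count  # Renvoie le nombre total de salutations
-- ===== SOURCE B (Python) =====
-- def check_salute(corridor):
--     # Stage 0: same validation guard as the task requires.
--     if not all(c in '-<->' for c in corridor):
--         return 0
--     # Stage 1: build a prefix table; prefix[i] = number of '-' in corridor[:i].
--     prefix = [0]
--     for c in corridor:
--         prefix.append(prefix[-1] + (1 if c == '-' else 0))
--     # Stage 2: sum the table over the positions of '>'.
--     return sum(p for c, p in zip(corridor, prefix) if c == '>')
-- ===== Notes on version B (the rewrite author's own statement) =====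
-- stated objective: alternative
-- what changed: B replaces A's single-pass running-counter accumulation by two staged passes: it first materialises a prefix table of cumulative '-' counts, then sums that table over the positions of '>'.
import Mathlib
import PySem

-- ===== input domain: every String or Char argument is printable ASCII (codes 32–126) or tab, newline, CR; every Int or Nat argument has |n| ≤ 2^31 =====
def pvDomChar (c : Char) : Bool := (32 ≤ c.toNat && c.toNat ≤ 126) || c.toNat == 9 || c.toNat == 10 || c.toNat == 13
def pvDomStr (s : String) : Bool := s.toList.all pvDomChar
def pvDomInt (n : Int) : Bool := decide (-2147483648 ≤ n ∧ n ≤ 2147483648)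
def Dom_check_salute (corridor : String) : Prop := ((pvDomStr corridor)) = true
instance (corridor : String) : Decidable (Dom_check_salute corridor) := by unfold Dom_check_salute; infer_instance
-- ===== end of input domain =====

-- B replaces A's single-pass running-counter accumulation by two staged passes:
-- build a prefix table of cumulative '-' counts, then sum it over the '>' positions
-- (alternative decomposition, same cost).


-- ===== PORT A =====
-- `char in '-<->'` for a single char = membership among its characters
def pvInChars (c : Char) : Bool := ("-<->".toList).contains c

def check_salute (corridor : String) : Int :=
  if !(corridor.toList.all pvInChars) then 0
  else
    -- (salute_count, left_to_right) accumulated left to right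
    (corridor.toList.foldl
      (fun (st : Int × Int) c =>
        if c = '-' then (st.1, st.2 + 1)
        else if c = '>' then (st.1 + st.2, st.2)
        else st) (0, 0)).1

-- ===== PORT B =====
-- Stage 1 of Source B: prefix table, appending prefix[-1] + (1 if c == '-' else 0)
def pvBuildPrefix : List Char → List Int → List Int
  | [], acc => acc
  | c :: rest, acc =>
    pvBuildPrefix rest (acc ++ [((acc.getLast?).getD 0) + (if c = '-' then 1 else 0)])

def check_salute_alt (corridor : String) : Int :=
  if !(corridor.toList.all pvInChars) then 0
  else
    -- Stage 2 of Source B: sum(p for c, p in zip(corridor, prefix) if c == '>')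
    let prefixTbl := pvBuildPrefix corridor.toList [0]
    (corridor.toList.zip prefixTbl).foldl
      (fun (t : Int) (cp : Char × Int) => if cp.1 = '>' then t + cp.2 else t) 0

-- ===== PRECONDITION & SPEC =====
def Spec_check_salute (corridor : String) (out : Int) : Prop := out = check_salute_alt corridor
instance (corridor : String) (out : Int) : Decidable (Spec_check_salute corridor out) := by unfold Spec_check_salute; infer_instance

-- ===== CLAIM =====
def Claim_equal_check_salute : Prop := ∀ (corridor : String), Dom_check_salute corridor → Spec_check_salute corridor (check_salute corridor)

-- ===== LEMMAS AND PROOFS =====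

-- Int-valued character counts
def dashCnt : List Char → Int
  | [] => 0
  | c :: l => (if c = '-' then 1 else 0) + dashCnt l

def gtCnt : List Char → Int
  | [] => 0
  | c :: l => (if c = '>' then 1 else 0) + gtCnt l

-- pairs: for each '-' in l, the number of '>' after it
def pCnt : List Char → Int
  | [] => 0
  | c :: l => (if c = '-' then gtCnt l else 0) + pCnt l

-- mathematical form of B's prefix-table tail starting from running dash count d
def pvShifts : List Char → Int → List Int
  | [], _ => []
  | c :: l, d =>
    (d + (if c = '-' then 1 else 0)) :: pvShifts l (d + (if c = '-' then 1 else 0))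

-- A's fold, closed form
theorem foldA_closed (l : List Char) (s ltr : Int) :
    l.foldl (fun (st : Int × Int) c =>
        if c = '-' then (st.1, st.2 + 1)
        else if c = '>' then (st.1 + st.2, st.2)
        else st) (s, ltr)
      = (s + ltr * gtCnt l + pCnt l, ltr + dashCnt l) := by
  induction l generalizing s ltr with
  | nil => simp [gtCnt, pCnt, dashCnt]
  | cons c l ih =>
    by_cases h1 : c = '-'
    · simp [h1, List.foldl_cons, ih, gtCnt, pCnt, dashCnt]; constructor <;> ring
    · by_cases h2 : c = '>'
      · simp [h1, h2, List.foldl_cons, ih, gtCnt, pCnt, dashCnt]; ring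
      · simp [h1, h2, List.foldl_cons, ih, gtCnt, pCnt, dashCnt]

-- Stage 1 characterised: the build appends pvShifts of the last accumulated value
theorem buildPrefix_eq (l : List Char) (acc : List Int) :
    pvBuildPrefix l acc = acc ++ pvShifts l ((acc.getLast?).getD 0) := by
  induction l generalizing acc with
  | nil => simp [pvBuildPrefix, pvShifts]
  | cons c l ih =>
    simp only [pvBuildPrefix, pvShifts, ih, List.getLast?_concat, Option.getD_some,
      List.append_assoc, List.cons_append, List.nil_append]

-- Stage 2 characterised: folding the zip with the table equals d·(#'>') + pair count
theorem zipFold_closed (l : List Char) (d t : Int) :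
    (l.zip (d :: pvShifts l d)).foldl
        (fun (t : Int) (cp : Char × Int) => if cp.1 = '>' then t + cp.2 else t) t
      = t + d * gtCnt l + pCnt l := by
  induction l generalizing d t with
  | nil => simp [gtCnt, pCnt]
  | cons c l ih =>
    by_cases h1 : c = '-'
    · simp [h1, pvShifts, List.zip_cons_cons, ih, gtCnt, pCnt, dashCnt]; ring
    · by_cases h2 : c = '>'
      · simp [h1, h2, pvShifts, List.zip_cons_cons, ih, gtCnt, pCnt]; ring
      · simp [h1, h2, pvShifts, List.zip_cons_cons, ih, gtCnt, pCnt]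

-- ===== VERDICT =====
theorem check_salute_spec : Claim_equal_check_salute := by
  unfold Claim_equal_check_salute
  intro corridor _
  unfold Spec_check_salute check_salute check_salute_alt
  by_cases hv : corridor.toList.all pvInChars = true
  · have hb : pvBuildPrefix corridor.toList [0]
        = (0 : Int) :: pvShifts corridor.toList 0 := by
      simpa using buildPrefix_eq corridor.toList [0]
    simp only [hv, Bool.not_true, Bool.false_eq_true, if_false, hb,
      zipFold_closed, foldA_closed]
  · simp [hv]
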